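-- pv_equiv track=rewrite | github.com/changkun/life-simulator | life/modes/programmable_matter.py | _shape_diamond
-- ===== SOURCE A (Python) =====
-- def _shape_diamond(rows, cols):
--     """Return set of (r,c) for a diamond."""
--     cr, cc = rows // 2, cols // 2
--     radius = min(rows, cols) // 4
--     pts = set()
--     for r in range(rows):
--         for c in range(cols):
--             if abs(r - cr) + abs(c - cc) <= radius:
--                 pts.add((r, c))
--     return pts
-- ===== SOURCE B (Python) =====
-- def _shape_diamond(rows, cols):
--     """Return set of (r,c) for a diamond."""
--     cr, cc = rows // 2, cols // 2
--     radius = min(rows, cols) // 4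
--     pts = set()
--     for r in range(max(0, cr - radius), min(rows, cr + radius + 1)):
--         d = radius - abs(r - cr)
--         cs = range(max(0, cc - d), min(cols, cc + d + 1))
--         pts.update(zip([r] * len(cs), cs))
--     return pts
-- ===== Notes on version B (the rewrite author's own statement) =====
-- stated objective: faster
-- what changed: Instead of testing every cell of the rows x cols grid against the Manhattan-distance predicate, B iterates only over the diamond's row band and fills each row's clipped column interval in one bulk update (zip of a range), so no cell outside the diamond is ever examined.
import Mathlib
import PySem

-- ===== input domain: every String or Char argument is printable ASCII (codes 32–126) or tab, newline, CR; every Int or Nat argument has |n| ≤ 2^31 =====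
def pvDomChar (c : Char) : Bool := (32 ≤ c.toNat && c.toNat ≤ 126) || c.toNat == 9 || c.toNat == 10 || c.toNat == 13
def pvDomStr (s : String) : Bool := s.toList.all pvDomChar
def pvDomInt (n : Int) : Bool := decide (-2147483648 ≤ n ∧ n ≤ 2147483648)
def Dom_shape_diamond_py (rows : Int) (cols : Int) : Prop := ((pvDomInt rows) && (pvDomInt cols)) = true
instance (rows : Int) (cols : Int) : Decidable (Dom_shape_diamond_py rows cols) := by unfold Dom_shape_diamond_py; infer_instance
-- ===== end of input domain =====

-- B replaces A's full-grid scan with direct enumeration of the diamond's row band, filling each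
-- row's clipped column interval at once (faster: no cell outside the diamond is examined);
-- Python returns a set — both ports build the PySem.Set in the same (lexicographic) insertion
-- order, and the proved equality is of those element lists.


-- ===== PORT A =====
def shape_diamond_py (rows : Int) (cols : Int) : List (Int × Int) :=
  let cr := PySem.Int.floordiv rows 2
  let cc := PySem.Int.floordiv cols 2
  let radius := PySem.Int.floordiv (min rows cols) 4
  (PySem.List.pyRange 0 rows 1).foldl (fun pts r =>
    (PySem.List.pyRange 0 cols 1).foldl (fun pts c =>
      if |r - cr| + |c - cc| ≤ radius then PySem.Set.add pts (r, c) else pts) pts) []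

-- ===== PORT B =====
def shape_diamond_py_alt (rows : Int) (cols : Int) : List (Int × Int) :=
  let cr := PySem.Int.floordiv rows 2
  let cc := PySem.Int.floordiv cols 2
  let radius := PySem.Int.floordiv (min rows cols) 4
  (PySem.List.pyRange (max 0 (cr - radius)) (min rows (cr + radius + 1)) 1).foldl (fun pts r =>
    let d := radius - |r - cr|
    let cs := PySem.List.pyRange (max 0 (cc - d)) (min cols (cc + d + 1)) 1
    PySem.Set.update pts (List.zip (List.replicate cs.length r) cs)) []

-- ===== PRECONDITION & SPEC =====
def Spec_shape_diamond_py (rows : Int) (cols : Int) (out : List (Int × Int)) : Prop := out = shape_diamond_py_alt rows cols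
instance (rows : Int) (cols : Int) (out : List (Int × Int)) : Decidable (Spec_shape_diamond_py rows cols out) := by unfold Spec_shape_diamond_py; infer_instance

-- ===== CLAIM (what is proved, stated in full; the proofs are below) =====
def Claim_equal_shape_diamond_py : Prop := ∀ (rows : Int) (cols : Int), Dom_shape_diamond_py rows cols → Spec_shape_diamond_py rows cols (shape_diamond_py rows cols)

-- ===== LEMMAS AND PROOFS =====

-- Folding Set.add over fresh, pairwise-distinct images appends them (conditional version).
lemma foldl_add_if_of_fresh {α β : Type} [BEq β] [LawfulBEq β] (g : α → β) (p : α → Prop)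
    [DecidablePred p] :
    ∀ (L : List α) (s : List β), (L.map g).Nodup → (∀ x ∈ L, g x ∉ s) →
      L.foldl (fun s x => if p x then PySem.Set.add s (g x) else s) s
        = s ++ (L.filter (fun x => decide (p x))).map g := by
  intro L
  induction L with
  | nil => intro s _ _; simp
  | cons x t ih =>
    intro s hnd hfresh
    simp only [List.map_cons, List.nodup_cons, List.mem_map] at hnd
    simp only [List.foldl_cons, List.filter_cons]
    by_cases hp : p x
    · rw [if_pos hp, PySem.Set.add_of_not_mem (hfresh x (by simp))]
      rw [ih (s ++ [g x]) hnd.2 ?_]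
      · simp [hp]
      · intro y hy
        simp only [List.mem_append, List.mem_singleton]
        rintro (h | h)
        · exact hfresh y (by simp [hy]) h
        · exact hnd.1 ⟨y, hy, h⟩
    · rw [if_neg hp, ih s hnd.2 (fun y hy => hfresh y (by simp [hy]))]
      simp [hp]

-- zip([r]*len(cs), cs) pairs r with every element of cs.
lemma zip_replicate {α β : Type} (a : α) :
    ∀ (l : List β), List.zip (List.replicate l.length a) l = l.map (fun x => (a, x)) := by
  intro l
  induction l with
  | nil => rfl
  | cons x t ih => simp [List.replicate_succ, ih]

-- A's double loop collects each row's filtered cells in order.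
lemma outerA (cr cc radius cols : Int) :
    ∀ (R : List Int) (pts : List (Int × Int)), R.Nodup → (∀ q ∈ pts, q.1 ∉ R) →
      R.foldl (fun pts r =>
          (PySem.List.pyRange 0 cols 1).foldl (fun pts c =>
            if |r - cr| + |c - cc| ≤ radius then PySem.Set.add pts (r, c) else pts) pts) pts
        = pts ++ R.flatMap (fun r =>
            ((PySem.List.pyRange 0 cols 1).filter
              (fun c => decide (|r - cr| + |c - cc| ≤ radius))).map (fun c => (r, c))) := by
  intro R
  induction R with
  | nil => intro pts _ _; simp
  | cons r t ih =>
    intro pts hnd hfresh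
    simp only [List.nodup_cons] at hnd
    simp only [List.foldl_cons]
    rw [foldl_add_if_of_fresh (fun c => ((r : Int), c)) (fun c => |r - cr| + |c - cc| ≤ radius)
          (PySem.List.pyRange 0 cols 1) pts
          ((PySem.List.nodup_pyRange_one 0 cols).map (fun a b h => by
            simpa using congrArg Prod.snd h))
          (fun c _ hc => hfresh (r, c) hc (by simp))]
    rw [ih _ hnd.2 ?_]
    · simp
    · intro q hq
      rcases List.mem_append.mp hq with h | h
      · exact fun hm => hfresh q h (List.mem_cons_of_mem _ hm)
      · rcases List.mem_map.mp h with ⟨c, _, rfl⟩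
        exact hnd.1

-- B's loop appends each row's clipped column interval in order.
lemma outerB (cr cc radius cols : Int) :
    ∀ (R : List Int) (pts : List (Int × Int)), R.Nodup → (∀ q ∈ pts, q.1 ∉ R) →
      R.foldl (fun pts r =>
          let d := radius - |r - cr|
          let cs := PySem.List.pyRange (max 0 (cc - d)) (min cols (cc + d + 1)) 1
          PySem.Set.update pts (List.zip (List.replicate cs.length r) cs)) pts
        = pts ++ R.flatMap (fun r =>
            (PySem.List.pyRange (max 0 (cc - (radius - |r - cr|)))
              (min cols (cc + (radius - |r - cr|) + 1)) 1).map (fun c => (r, c))) := by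
  intro R
  induction R with
  | nil => intro pts _ _; simp
  | cons r t ih =>
    intro pts hnd hfresh
    simp only [List.nodup_cons] at hnd
    simp only [List.foldl_cons]
    rw [zip_replicate]
    have h1 : ((PySem.List.pyRange (max 0 (cc - (radius - |r - cr|)))
        (min cols (cc + (radius - |r - cr|) + 1)) 1).map (fun c => ((r : Int), c))).Nodup :=
      (PySem.List.nodup_pyRange_one _ _).map (fun a b h => by simpa using congrArg Prod.snd h)
    have h2 : ∀ x ∈ (PySem.List.pyRange (max 0 (cc - (radius - |r - cr|)))
        (min cols (cc + (radius - |r - cr|) + 1)) 1).map (fun c => ((r : Int), c)), x ∉ pts := by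
      intro x hx
      rcases List.mem_map.mp hx with ⟨c, _, rfl⟩
      exact fun hxs => hfresh (r, c) hxs (by simp)
    rw [PySem.Set.update_eq_append_of_disjoint pts _ h1 h2]
    rw [ih _ hnd.2 ?_]
    · simp
    · intro q hq
      rcases List.mem_append.mp hq with h | h
      · exact fun hm => hfresh q h (List.mem_cons_of_mem _ hm)
      · rcases List.mem_map.mp h with ⟨c, _, rfl⟩
        exact hnd.1

-- Filtering an integer range by an interval condition clips the range.
lemma filter_interval (lo hi : Int) :
    ∀ (n : Nat) (a b : Int), (b - a).toNat = n →
      (PySem.List.pyRange a b 1).filter (fun x => decide (lo ≤ x ∧ x ≤ hi))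
        = PySem.List.pyRange (max a lo) (min b (hi + 1)) 1 := by
  intro n
  induction n with
  | zero =>
    intro a b h
    rw [PySem.List.pyRange_one_eq_nil (by omega), PySem.List.pyRange_one_eq_nil (by omega)]
    rfl
  | succ k ih =>
    intro a b h
    have hab : a < b := by omega
    rw [PySem.List.pyRange_one_cons hab, List.filter_cons]
    by_cases hx : lo ≤ a ∧ a ≤ hi
    · rw [if_pos (by simpa using hx), ih (a + 1) b (by omega)]
      have h1 : max a lo = a := by omega
      have h2 : max (a + 1) lo = a + 1 := by omega
      rw [h1, h2, PySem.List.pyRange_one_cons (show a < min b (hi + 1) by omega)]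
    · rw [if_neg (by simpa using hx), ih (a + 1) b (by omega)]
      rcases not_and_or.mp hx with h' | h'
      · have : max (a + 1) lo = max a lo := by omega
        rw [this]
      · rw [PySem.List.pyRange_one_eq_nil (by omega), PySem.List.pyRange_one_eq_nil (by omega)]

-- The diamond-distance predicate on a column is an interval condition on c.
lemma pred_interval (r cr cc radius c : Int) :
    decide (|r - cr| + |c - cc| ≤ radius)
      = decide ((cc - (radius - |r - cr|)) ≤ c ∧ c ≤ cc + (radius - |r - cr|)) := by
  rcases abs_cases (r - cr) with ⟨h1, _⟩ | ⟨h1, _⟩ <;>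
    rcases abs_cases (c - cc) with ⟨h2, _⟩ | ⟨h2, _⟩ <;>
      (simp only [decide_eq_decide]; omega)

-- ===== VERDICT (by name: the statement is the Claim_ definition above) =====
theorem shape_diamond_py_spec : Claim_equal_shape_diamond_py := by
  intro rows cols _
  simp only [Spec_shape_diamond_py, shape_diamond_py, shape_diamond_py_alt,
    PySem.Int.floordiv_eq_ediv_of_pos (show (0:Int) < 2 by norm_num),
    PySem.Int.floordiv_eq_ediv_of_pos (show (0:Int) < 4 by norm_num)]
  generalize hcr : rows / 2 = cr
  generalize hcc : cols / 2 = cc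
  generalize hrd : min rows cols / 4 = radius
  rw [outerA cr cc radius cols _ [] (PySem.List.nodup_pyRange_one 0 rows) (by simp)]
  rw [outerB cr cc radius cols _ [] (PySem.List.nodup_pyRange_one _ _) (by simp)]
  simp only [List.nil_append]
  have hrow : (fun r : Int =>
      ((PySem.List.pyRange 0 cols 1).filter
        (fun c => decide (|r - cr| + |c - cc| ≤ radius))).map (fun c => (r, c)))
      = (fun r : Int =>
      (PySem.List.pyRange (max 0 (cc - (radius - |r - cr|)))
          (min cols (cc + (radius - |r - cr|) + 1)) 1).map (fun c => (r, c))) := by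
    funext r
    congr 1
    rw [List.filter_congr (fun c _ => pred_interval r cr cc radius c)]
    exact filter_interval _ _ (cols - 0).toNat 0 cols rfl
  rw [hrow]
  -- the remaining flatMaps agree: rows outside the band contribute nothing
  by_cases hpos : 0 < rows ∧ 0 < cols
  · obtain ⟨hr, hc⟩ := hpos
    have h0 : (0 : Int) ≤ max 0 (cr - radius) := by omega
    have h01 : max 0 (cr - radius) ≤ min rows (cr + radius + 1) := by omega
    have h1 : min rows (cr + radius + 1) ≤ rows := by omega
    rw [PySem.List.pyRange_one_append 0 (max 0 (cr - radius)) rows h0 (by omega),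
        PySem.List.pyRange_one_append (max 0 (cr - radius)) (min rows (cr + radius + 1)) rows h01 h1,
        List.flatMap_append, List.flatMap_append]
    have hleft : ∀ r ∈ PySem.List.pyRange 0 (max 0 (cr - radius)) 1,
        (PySem.List.pyRange (max 0 (cc - (radius - |r - cr|)))
          (min cols (cc + (radius - |r - cr|) + 1)) 1).map (fun c => (r, c)) = [] := by
      intro r hrm
      rw [PySem.List.mem_pyRange_one] at hrm
      rcases abs_cases (r - cr) with ⟨ha, _⟩ | ⟨ha, _⟩ <;>
        (rw [PySem.List.pyRange_one_eq_nil (by omega)]; rfl)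
    have hright : ∀ r ∈ PySem.List.pyRange (min rows (cr + radius + 1)) rows 1,
        (PySem.List.pyRange (max 0 (cc - (radius - |r - cr|)))
          (min cols (cc + (radius - |r - cr|) + 1)) 1).map (fun c => (r, c)) = [] := by
      intro r hrm
      rw [PySem.List.mem_pyRange_one] at hrm
      rcases abs_cases (r - cr) with ⟨ha, _⟩ | ⟨ha, _⟩ <;>
        (rw [PySem.List.pyRange_one_eq_nil (by omega)]; rfl)
    rw [List.flatMap_eq_nil_iff.mpr hleft, List.flatMap_eq_nil_iff.mpr hright]
    simp
  · rcases (by omega : rows ≤ 0 ∨ cols ≤ 0) with h | h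
    · rw [PySem.List.pyRange_one_eq_nil (by omega), PySem.List.pyRange_one_eq_nil (by omega)]
    · have hall : ∀ r : Int,
          (PySem.List.pyRange (max 0 (cc - (radius - |r - cr|)))
            (min cols (cc + (radius - |r - cr|) + 1)) 1).map (fun c => ((r : Int), c)) = [] := by
        intro r
        rw [PySem.List.pyRange_one_eq_nil (by omega)]
        rfl
      rw [List.flatMap_eq_nil_iff.mpr (fun r _ => hall r),
          List.flatMap_eq_nil_iff.mpr (fun r _ => hall r)]
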